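-- pv_equiv track=rewrite | github.com/finsteininvest/pythonwilltrade | readconsors/consors2json.py | get_group_members
-- ===== SOURCE A (Python) =====
-- import operator
--
-- def get_group_members(list, group):
--     '''Function to find all text that belongs together
--        based on their y value belonging to a group
--
--     '''
--
--     group_members = []
--     last_list_item = 0
--     for item in group:
--         for index, list_item in enumerate(list):
--             if index >= last_list_item:
--                 if item == list_item[0]:
--                     group_members.append(list_item)
--                     last_list_item = index+1
--                     break
--     sorted_group_members = sorted(group_members, key = operator.itemgetter(1))
--     return sorted_group_members
-- ===== SOURCE B (Python) =====
-- def _bisect_left(a, x):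
--     lo, hi = 0, len(a)
--     while lo < hi:
--         mid = (lo + hi) // 2
--         if a[mid] < x:
--             lo = mid + 1
--         else:
--             hi = mid
--     return lo
--
-- def get_group_members(list, group):
--     # index every y value once: value -> ascending list of row indices
--     # (empty rows carry no y value and can never match, so they are skipped),
--     # then answer each group item with a binary search for the first
--     # index not yet passed.
--     positions = {}
--     for index, row in enumerate(list):
--         if row:
--             positions.setdefault(row[0], []).append(index)
--     group_members = []
--     last_list_item = 0
--     for item in group:
--         idxs = positions.get(item, [])
--         j = _bisect_left(idxs, last_list_item)
--         if j < len(idxs):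
--             i = idxs[j]
--             group_members.append(list[i])
--             last_list_item = i + 1
--     return sorted(group_members, key=lambda row: row[1])
-- ===== Notes on version B (the rewrite author's own statement) =====
-- stated objective: faster
-- what changed: Replaced A's per-group-item linear rescan of the list by a single pass building a value->ascending-index dictionary (skipping empty rows, which can never match), each group item then answered with a binary search for the first index not yet passed.
-- outside the precondition, e.g. on get_group_members([[7, 2], []], [7]): A returns [[7, 2]], B returns [[7, 2]]; on get_group_members([[1, 0], [1]], [1]): A returns [[1, 0]], B returns [[1, 0]]; on get_group_members([[7]], [7]): A raises IndexError, B raises IndexError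
import Mathlib
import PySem

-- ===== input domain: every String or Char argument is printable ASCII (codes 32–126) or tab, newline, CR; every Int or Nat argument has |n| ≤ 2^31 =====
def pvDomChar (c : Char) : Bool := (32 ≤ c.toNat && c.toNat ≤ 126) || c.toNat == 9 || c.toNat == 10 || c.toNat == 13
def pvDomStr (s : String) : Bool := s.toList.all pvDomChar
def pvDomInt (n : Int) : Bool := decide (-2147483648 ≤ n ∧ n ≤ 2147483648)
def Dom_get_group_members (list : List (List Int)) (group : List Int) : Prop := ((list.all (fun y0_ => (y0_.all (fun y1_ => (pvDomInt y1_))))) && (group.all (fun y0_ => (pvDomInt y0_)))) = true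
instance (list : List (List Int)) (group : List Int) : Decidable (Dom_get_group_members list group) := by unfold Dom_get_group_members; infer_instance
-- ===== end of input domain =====

-- B replaces A's per-item linear rescans by a one-pass value→indices index plus a
-- hand-written binary search for the first not-yet-passed index (objective: faster).

-- ===== PORT A =====
-- inner 'for index, list_item in enumerate(list): if index >= last: if item == list_item[0]: … break'
def pvFindA : List (Int × List Int) → Int → Int → Option (Int × List Int)
  | [], _, _ => none
  | p :: rest, item, last =>
    if last ≤ p.1 then
      if item = PySem.List.pyGetD p.2 0 0 then some p
      else pvFindA rest item last
    else pvFindA rest item last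

def get_group_members (list : List (List Int)) (group : List Int) : List (List Int) :=
  let st := group.foldl (fun (st : List (List Int) × Int) item =>
      match pvFindA (PySem.List.enumerate list) item st.2 with
      | some p => (st.1 ++ [p.2], p.1 + 1)
      | none => st) (([] : List (List Int)), (0 : Int))
  PySem.List.sorted st.1 (fun r => PySem.List.pyGetD r 1 0)

-- ===== PORT B =====
-- Source B's hand-written _bisect_left: 'while lo < hi: mid = (lo+hi)//2; …', fuel = len(a) bounds the loop
def pvBisectLoop (a : List Int) (x : Int) : Nat → Nat → Nat → Nat
  | 0, lo, _ => lo
  | fuel+1, lo, hi =>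
    if lo < hi then
      match a[(lo + hi) / 2]? with
      | some y => if y < x then pvBisectLoop a x fuel ((lo + hi) / 2 + 1) hi
                  else pvBisectLoop a x fuel lo ((lo + hi) / 2)
      | none => lo
    else lo

def pvBisect (a : List Int) (x : Int) : Nat := pvBisectLoop a x a.length 0 a.length

def get_group_members_alt (list : List (List Int)) (group : List Int) : List (List Int) :=
  -- 'if row: positions.setdefault(row[0], []).append(index)'
  let positions : PySem.Dict Int (List Int) :=
    (PySem.List.enumerate list).foldl
      (fun d p => if p.2 = [] then d
                  else d.modify (PySem.List.pyGetD p.2 0 0) [] (· ++ [p.1])) PySem.Dict.empty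
  let st := group.foldl (fun (st : List (List Int) × Int) item =>
      let idxs := positions.getD item []
      let j := pvBisect idxs st.2
      if _h : j < idxs.length then
        (st.1 ++ [PySem.List.pyGetD list (idxs.getD j 0) []], idxs.getD j 0 + 1)
      else st) (([] : List (List Int)), (0 : Int))
  PySem.List.sorted st.1 (fun r => PySem.List.pyGetD r 1 0)

-- ===== PRECONDITION & SPEC =====
-- Pre_ excludes nonempty groups over lists that contain a row of length < 2: an empty
-- row raises IndexError when A's scan reaches it, and a length-1 row whose key occurs
-- in group raises IndexError in the final sort of both programs if it gets matched; a
-- few such inputs still return in A (the short row is never scanned or never matched)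
-- and there A and B return the same value anyway.
def Pre_get_group_members (list : List (List Int)) (group : List Int) : Prop :=
  group = [] ∨ ∀ row ∈ list, 1 ≤ row.length ∧ (row.length = 1 → row.getD 0 0 ∉ group)
instance (list : List (List Int)) (group : List Int) : Decidable (Pre_get_group_members list group) := by unfold Pre_get_group_members; infer_instance

def pvWitness_get_group_members : List (List Int) × List Int := ([[1, 2], [1, 3]], [1, 1])

def Spec_get_group_members (list : List (List Int)) (group : List Int) (out : List (List Int)) : Prop := out = get_group_members_alt list group
instance (list : List (List Int)) (group : List Int) (out : List (List Int)) : Decidable (Spec_get_group_members list group out) := by unfold Spec_get_group_members; infer_instance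

-- ===== CLAIM (what is proved, stated in full; the proofs are below) =====
def Claim_equal_get_group_members : Prop := ∀ (list : List (List Int)) (group : List Int), Dom_get_group_members list group → Pre_get_group_members list group → Spec_get_group_members list group (get_group_members list group)

-- ===== LEMMAS AND PROOFS =====

-- the two fold steps, named so the folds can be reasoned about
def pvStepA (list : List (List Int)) (st : List (List Int) × Int) (item : Int) :
    List (List Int) × Int :=
  match pvFindA (PySem.List.enumerate list) item st.2 with
  | some p => (st.1 ++ [p.2], p.1 + 1)
  | none => st

def pvStepB (list : List (List Int)) (st : List (List Int) × Int) (item : Int) :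
    List (List Int) × Int :=
  let positions : PySem.Dict Int (List Int) :=
    (PySem.List.enumerate list).foldl
      (fun d p => if p.2 = [] then d
                  else d.modify (PySem.List.pyGetD p.2 0 0) [] (· ++ [p.1])) PySem.Dict.empty
  let idxs := positions.getD item []
  let j := pvBisect idxs st.2
  if _h : j < idxs.length then
    (st.1 ++ [PySem.List.pyGetD list (idxs.getD j 0) []], idxs.getD j 0 + 1)
  else st

theorem pvBisectLoop_eq_bisectLeftLoop (a : List Int) (x : Int) :
    ∀ fuel lo hi, pvBisectLoop a x fuel lo hi = PySem.List.bisectLeftLoop a x fuel lo hi := by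
  intro fuel
  induction fuel with
  | zero => intro lo hi; rfl
  | succ n ih =>
      intro lo hi
      simp only [pvBisectLoop, PySem.List.bisectLeftLoop]
      split_ifs with h
      · cases ha : a[(lo + hi) / 2]? with
        | none => simp
        | some y => by_cases hy : y < x <;> simp [hy, ih]
      · rfl

theorem pvBisect_eq (a : List Int) (x : Int) : pvBisect a x = PySem.List.bisectLeft a x := by
  unfold pvBisect PySem.List.bisectLeft
  exact pvBisectLoop_eq_bisectLeftLoop a x a.length 0 a.length

-- when every row is nonempty, the guard in B's index-building pass never fires
theorem pvGuardedFold_eq (rows : List (Int × List Int)) (d : PySem.Dict Int (List Int))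
    (h : ∀ p ∈ rows, p.2 ≠ []) :
    rows.foldl (fun d p => if p.2 = [] then d
                  else d.modify (PySem.List.pyGetD p.2 0 0) [] (· ++ [p.1])) d =
    rows.foldl (fun d p => d.modify (PySem.List.pyGetD p.2 0 0) [] (· ++ [p.1])) d := by
  induction rows generalizing d with
  | nil => rfl
  | cons p rest ih =>
      have hp : p.2 ≠ [] := h p (List.mem_cons_self)
      simp only [List.foldl_cons, if_neg hp]
      exact ih _ (fun q hq => h q (List.mem_cons_of_mem _ hq))

-- A's inner loop is find? of the combined test
theorem pvFindA_eq_find? (rows : List (Int × List Int)) (item last : Int) :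
    pvFindA rows item last =
      rows.find? (fun p => decide (last ≤ p.1) && decide (item = PySem.List.pyGetD p.2 0 0)) := by
  induction rows with
  | nil => rfl
  | cons p rest ih =>
      simp only [pvFindA, List.find?]
      by_cases h1 : last ≤ p.1
      · by_cases h2 : item = PySem.List.pyGetD p.2 0 0
        · simp [h1, h2]
        · simp [h1, h2, ih]
      · simp [h1, ih]

theorem find?_and_eq_find?_filter {α : Type} (l : List α) (b1 b2 : α → Bool) :
    l.find? (fun x => b1 x && b2 x) = (l.filter b2).find? b1 := by
  induction l with
  | nil => rfl
  | cons x xs ih =>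
      by_cases h2 : b2 x
      · by_cases h1 : b1 x <;> simp [List.find?, List.filter, h1, h2, ih]
      · simp [List.find?, List.filter, h2, ih]

-- the grouping pass: what the positions dict holds at each key
theorem pvPositions_getD (rows : List (Int × List Int)) (d : PySem.Dict Int (List Int))
    (k : Int) :
    ((rows.foldl (fun d p => d.modify (PySem.List.pyGetD p.2 0 0) [] (· ++ [p.1])) d).getD k []) =
      d.getD k [] ++ (rows.filter (fun p => decide (k = PySem.List.pyGetD p.2 0 0))).map (·.1) := by
  induction rows generalizing d with
  | nil => simp
  | cons p rest ih =>
      simp only [List.foldl_cons, ih, List.filter_cons]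
      rw [PySem.Dict.getD_modify]
      by_cases h : k = PySem.List.pyGetD p.2 0 0 <;> simp [h]

theorem find?_eq_some_of_first {α : Type} (l : List α) (p : α → Bool) (j : Nat)
    (hj : j < l.length)
    (hbefore : ∀ i, i < j → ∀ (hi : i < l.length), p l[i] = false)
    (hat : p l[j] = true) : l.find? p = some l[j] := by
  induction l generalizing j with
  | nil => simp at hj
  | cons x xs ih =>
      cases j with
      | zero =>
          simp only [List.getElem_cons_zero] at hat ⊢
          rw [List.find?_cons_of_pos hat]
      | succ j' =>
          have hx : p x = false := hbefore 0 (Nat.succ_pos _) (by simp)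
          simp only [List.find?, hx]
          exact ih j' (by simpa using hj)
            (fun i hi hi' => hbefore (i+1) (by omega) (by simpa using hi'))
            (by simpa using hat)

-- the per-item steps agree when the cursor is nonnegative and rows are nonempty
theorem pvStep_eq (list : List (List Int)) (st : List (List Int) × Int) (item : Int)
    (h0 : 0 ≤ st.2) (hne : ∀ row ∈ list, row ≠ []) :
    pvStepA list st item = pvStepB list st item ∧ 0 ≤ (pvStepA list st item).2 := by
  classical
  have hneP : ∀ p ∈ PySem.List.enumerate list, p.2 ≠ [] := by
    intro p hp
    rcases (PySem.List.mem_enumerate_iff _ _ _).1 hp with ⟨k, hk, hpk⟩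
    subst hpk
    exact hne _ (List.getElem_mem hk)
  set pairs : List (Int × List Int) :=
    (PySem.List.enumerate list).filter (fun p => decide (item = PySem.List.pyGetD p.2 0 0))
    with hpairs
  have hidxs :
      (((PySem.List.enumerate list).foldl
        (fun d p => if p.2 = [] then d
                    else d.modify (PySem.List.pyGetD p.2 0 0) [] (· ++ [p.1]))
        PySem.Dict.empty).getD item []) = pairs.map (·.1) := by
    rw [pvGuardedFold_eq _ _ hneP, pvPositions_getD]; simp [hpairs]
  -- every pair comes from enumerate: its fst is its (nonnegative) index and its snd the row
  have hmem : ∀ p ∈ pairs, ∃ k : Nat, ∃ hk : k < list.length,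
      p = ((k : Int), list[k]) := by
    intro p hp
    have hp' : p ∈ PySem.List.enumerate list := List.mem_of_mem_filter hp
    rcases (PySem.List.mem_enumerate_iff _ _ _).1 hp' with ⟨k, hk, hpk⟩
    exact ⟨k, hk, by simpa using hpk⟩
  have hpair_lt : pairs.Pairwise (fun p q => p.1 < q.1) :=
    (PySem.List.pairwise_lt_enumerate (xs := list) (s := 0)).filter _
  have hsorted : (pairs.map (·.1)).Pairwise (· ≤ ·) := by
    rw [List.pairwise_map]
    exact hpair_lt.imp (fun h => le_of_lt h)
  have hspec := PySem.List.bisectLeft_spec (pairs.map (·.1)) st.2 hsorted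
  set a : List Int := pairs.map (·.1) with ha
  set j : Nat := PySem.List.bisectLeft a st.2 with hj
  have hfind :
      pvFindA (PySem.List.enumerate list) item st.2 =
        pairs.find? (fun p => decide (st.2 ≤ p.1)) := by
    rw [pvFindA_eq_find?, find?_and_eq_find?_filter]
  by_cases hlt : j < a.length
  · -- found: both take pairs[j]
    have hjp : j < pairs.length := by simpa [ha] using hlt
    have haj : a[j]'hlt = (pairs[j]'hjp).1 := by simp [ha]
    have hfound : pairs.find? (fun p => decide (st.2 ≤ p.1)) = some (pairs[j]'hjp) := by
      apply find?_eq_some_of_first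
      · intro i hi hi'
        have : a[i]'(by simpa [ha] using hi') < st.2 := hspec.2.1 i (by simpa [ha] using hi') hi
        simp only [decide_eq_false_iff_not, not_le]
        simpa [ha] using this
      · have : st.2 ≤ a[j]'hlt := hspec.2.2 j hlt (le_refl _)
        simp only [decide_eq_true_eq]
        simpa [haj] using this
    rcases hmem (pairs[j]'hjp) (List.getElem_mem hjp) with ⟨k, hk, hkp⟩
    have hrow : (pairs[j]'hjp).2 = PySem.List.pyGetD list ((pairs[j]'hjp).1) [] := by
      rw [hkp]
      simp [PySem.List.pyGetD_natCast, List.getD_eq_getElem?_getD, hk]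
    have hgd : (a.getD j 0) = (pairs[j]'hjp).1 := by
      rw [List.getD_eq_getElem?_getD]
      simp [List.getElem?_eq_getElem hlt, haj]
    have hnn : (0 : Int) ≤ (pairs[j]'hjp).1 := by rw [hkp]; positivity
    constructor
    · simp only [pvStepA, pvStepB, hfind, hfound, hidxs, pvBisect_eq, ← hj]
      rw [dif_pos hlt]
      have hopt : a[j]?.getD 0 = (pairs[j]'hjp).1 := by
        simp [List.getElem?_eq_getElem hlt, haj]
      simp [List.getD_eq_getElem?_getD, hopt, hrow]
    · simp [pvStepA, hfind, hfound]
      omega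
  · -- not found: both leave the state unchanged
    have hnone : pairs.find? (fun p => decide (st.2 ≤ p.1)) = none := by
      rw [List.find?_eq_none]
      intro x hx
      rcases List.mem_iff_getElem.1 hx with ⟨i, hi, hxi⟩
      have hij : i < j := by
        have := hspec.1
        have hia : i < a.length := by simpa [ha] using hi
        omega
      have : a[i]'(by simpa [ha] using hi) < st.2 := hspec.2.1 i (by simpa [ha] using hi) hij
      have hxlt : x.1 < st.2 := by rw [← hxi]; simpa [ha] using this
      simpa using not_le.mpr hxlt
    constructor
    · simp only [pvStepA, pvStepB, hfind, hnone, hidxs, pvBisect_eq, ← hj]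
      rw [dif_neg hlt]
    · simpa [pvStepA, hfind, hnone] using h0

theorem pvFold_eq (list : List (List Int)) (group : List Int)
    (hne : ∀ row ∈ list, row ≠ []) :
    ∀ st : List (List Int) × Int, 0 ≤ st.2 →
      group.foldl (pvStepA list) st = group.foldl (pvStepB list) st := by
  induction group with
  | nil => intro st _; rfl
  | cons item rest ih =>
      intro st h0
      obtain ⟨heq, hnn⟩ := pvStep_eq list st item h0 hne
      simp only [List.foldl_cons, ← heq]
      exact ih _ hnn

theorem portA_as_fold (list : List (List Int)) (group : List Int) :
    get_group_members list group =
      PySem.List.sorted (group.foldl (pvStepA list) ([], 0)).1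
        (fun r => PySem.List.pyGetD r 1 0) := rfl

theorem portB_as_fold (list : List (List Int)) (group : List Int) :
    get_group_members_alt list group =
      PySem.List.sorted (group.foldl (pvStepB list) ([], 0)).1
        (fun r => PySem.List.pyGetD r 1 0) := rfl

-- ===== VERDICT (by name: the statement is the Claim_ definition above) =====
theorem get_group_members_spec : Claim_equal_get_group_members := by
  intro list group _hdom hpre
  unfold Spec_get_group_members
  rcases hpre with hg | hrows
  · subst hg; rfl
  · have hne : ∀ row ∈ list, row ≠ [] := by
      intro row hrow
      have := (hrows row hrow).1
      intro h; subst h; simp at this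
    rw [portA_as_fold, portB_as_fold, pvFold_eq list group hne ([], 0) (by norm_num)]
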